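-- pv_equiv track=rewrite | github.com/isVitorEmanuel/pc | PC 04 - 2023.1 - Funções/questao5.py | parproximo
-- ===== SOURCE A (Python) =====
-- def parproximo(lista):
--
--   interMinimo = 1000000000000000000000000000000000000000000000000000
--   par = [0, 0]
--
--   for x in range(0, len(lista)):
--
--     for i in range(x + 1, len(lista)):
--
--       if(lista[x] > lista[i]):
--         if(lista[x] - lista[i] < interMinimo):
--           interMinimo = lista[x] - lista[i]
--           par[0] = lista[x]
--           par[1] = lista[i]
--       elif(lista[x] < lista[i]):
--         if(lista[i] - lista[x] < interMinimo):
--           interMinimo = lista[i] - lista[x]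
--           par[0] = lista[x]
--           par[1] = lista[i]
--       else:
--         if(lista[x] - lista[i] < interMinimo):
--           interMinimo = lista[x] - lista[i]
--           par[0] = lista[x]
--           par[1] = lista[i]
--
--   return par
-- ===== SOURCE B (Python) =====
-- def parproximo(lista):
--     # Sort once to find the minimal absolute difference d (min adjacent gap),
--     # then one right-to-left pass with a value->nearest-index dict to find the
--     # first pair (in A's x-major index order) achieving d.
--     n = len(lista)
--     if n < 2:
--         return [0, 0]
--     vals = sorted(lista)
--     d = min(vals[k + 1] - vals[k] for k in range(n - 1))
--     nearest = {}
--     ans = [0, 0]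
--     for x in range(n - 1, -1, -1):
--         v = lista[x]
--         i1 = nearest.get(v - d)
--         i2 = nearest.get(v + d)
--         i = i1 if i2 is None or (i1 is not None and i1 < i2) else i2
--         if i is not None:
--             ans = [v, lista[i]]
--         nearest[v] = x
--     return ans
-- ===== Notes on version B (the rewrite author's own statement) =====
-- stated objective: faster
-- what changed: Replaces A's O(n^2) scan over all index pairs with: sort once to obtain the minimal absolute difference as a minimal adjacent gap, then a single right-to-left pass with a value->nearest-index dictionary to locate the first pair (in A's x-major index order) achieving that gap.
import Mathlib
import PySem

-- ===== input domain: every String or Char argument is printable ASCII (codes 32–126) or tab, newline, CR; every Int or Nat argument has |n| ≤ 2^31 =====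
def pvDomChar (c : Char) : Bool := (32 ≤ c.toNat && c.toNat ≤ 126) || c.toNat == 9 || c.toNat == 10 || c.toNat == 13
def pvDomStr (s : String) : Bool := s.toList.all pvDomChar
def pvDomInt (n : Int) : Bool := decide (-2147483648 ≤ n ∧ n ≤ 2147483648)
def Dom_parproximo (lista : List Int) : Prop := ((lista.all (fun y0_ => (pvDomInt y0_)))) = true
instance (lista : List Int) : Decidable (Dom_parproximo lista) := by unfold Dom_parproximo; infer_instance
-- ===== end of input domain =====

-- B replaces A's all-pairs O(n^2) scan by sort + one dictionary pass (objective: faster, asymptotic).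

-- ===== PORT A =====
-- lista[x]/lista[i] are ported with pyGetD: the indices come from range(...) bounded by len(lista), so they are always in range (exact).
def parproximo (lista : List Int) : List Int :=
  let interMinimo : Int := 1000000000000000000000000000000000000000000000000000
  let st := (PySem.List.pyRange 0 (PySem.List.len lista) 1).foldl (fun (s : Int × List Int) x =>
      (PySem.List.pyRange (x + 1) (PySem.List.len lista) 1).foldl (fun (s : Int × List Int) i =>
        if PySem.List.pyGetD lista x 0 > PySem.List.pyGetD lista i 0 then
          (if PySem.List.pyGetD lista x 0 - PySem.List.pyGetD lista i 0 < s.1 then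
            (PySem.List.pyGetD lista x 0 - PySem.List.pyGetD lista i 0,
             PySem.List.pySetD (PySem.List.pySetD s.2 0 (PySem.List.pyGetD lista x 0)) 1 (PySem.List.pyGetD lista i 0))
          else s)
        else if PySem.List.pyGetD lista x 0 < PySem.List.pyGetD lista i 0 then
          (if PySem.List.pyGetD lista i 0 - PySem.List.pyGetD lista x 0 < s.1 then
            (PySem.List.pyGetD lista i 0 - PySem.List.pyGetD lista x 0,
             PySem.List.pySetD (PySem.List.pySetD s.2 0 (PySem.List.pyGetD lista x 0)) 1 (PySem.List.pyGetD lista i 0))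
          else s)
        else
          (if PySem.List.pyGetD lista x 0 - PySem.List.pyGetD lista i 0 < s.1 then
            (PySem.List.pyGetD lista x 0 - PySem.List.pyGetD lista i 0,
             PySem.List.pySetD (PySem.List.pySetD s.2 0 (PySem.List.pyGetD lista x 0)) 1 (PySem.List.pyGetD lista i 0))
          else s)) s)
    (interMinimo, [0, 0])
  st.2

-- ===== PORT B =====
-- B-side helpers: pvGap is Source B's `d = min(vals[k+1]-vals[k] ...)` (n ≥ 2 ⇒ the list is nonempty, so getD 0 is never taken);
-- pvStep is the body of Source B's right-to-left loop.
def pvGap (lista : List Int) : Int :=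
  let n := PySem.List.len lista
  let vals := PySem.List.sorted lista (fun v => v) false
  (PySem.List.min? ((PySem.List.pyRange 0 (n - 1) 1).map (fun k =>
      PySem.List.pyGetD vals (k + 1) 0 - PySem.List.pyGetD vals k 0)) (fun z => z)).getD 0

def pvStep (lista : List Int) (d : Int) (s : PySem.Dict Int Int × List Int) (x : Int) :
    PySem.Dict Int Int × List Int :=
  let v := PySem.List.pyGetD lista x 0
  let i1 := (s.1).get? (v - d)
  let i2 := (s.1).get? (v + d)
  let i : Option Int := match i1, i2 with
    | a, none => a
    | none, some b => some b
    | some a, some b => if a < b then some a else some b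
  let ans := match i with
    | none => s.2
    | some j => [v, PySem.List.pyGetD lista j 0]
  ((s.1).insert v x, ans)

def parproximo_alt (lista : List Int) : List Int :=
  let n := PySem.List.len lista
  if n < 2 then [0, 0]
  else
    let d := pvGap lista
    ((PySem.List.pyRange (n - 1) (-1) (-1)).foldl (pvStep lista d) (PySem.Dict.empty, [0, 0])).2

-- ===== PRECONDITION & SPEC =====
def Spec_parproximo (lista : List Int) (out : List Int) : Prop := out = parproximo_alt lista
instance (lista : List Int) (out : List Int) : Decidable (Spec_parproximo lista out) := by unfold Spec_parproximo; infer_instance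

-- ===== CLAIM (what is proved, stated in full; the proofs are below) =====
def Claim_equal_parproximo : Prop := ∀ (lista : List Int), Dom_parproximo lista → Spec_parproximo lista (parproximo lista)

-- ===== LEMMAS AND PROOFS =====

-- value at a Nat index, and the absolute difference |lista[x] - lista[i]| as A computes it
def pvVal (lista : List Int) (x : Nat) : Int := lista.getD x 0

def pvKeyN (lista : List Int) (x i : Nat) : Int :=
  if pvVal lista i ≤ pvVal lista x then pvVal lista x - pvVal lista i else pvVal lista i - pvVal lista x

-- first element of minimal key (ties -> earliest)
def pvFmin {α : Type} (key : α → Int) : List α → Option α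
  | [] => none
  | q :: t => match pvFmin key t with
    | none => some q
    | some p => if key q ≤ key p then some q else some p

theorem pvFmin_mem {α : Type} (key : α → Int) (l : List α) (p : α)
    (h : pvFmin key l = some p) : p ∈ l := by
  induction l with
  | nil => simp [pvFmin] at h
  | cons q t ih =>
    simp only [pvFmin] at h
    cases ht : pvFmin key t with
    | none => rw [ht] at h; simp at h; simp [h]
    | some r =>
      rw [ht] at h
      by_cases hk : key q ≤ key r
      · simp [hk] at h; simp [h]
      · simp [hk] at h; subst h; exact List.mem_cons_of_mem _ (ih ht)

theorem pvFmin_eq_of_pairwise {α : Type} (R : α → α → Prop) (key : α → Int) (l : List α) (p : α)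
    (hpw : l.Pairwise R) (hmem : p ∈ l)
    (hmin : ∀ q ∈ l, key p ≤ key q)
    (hstrict : ∀ q ∈ l, R q p → key p < key q) :
    pvFmin key l = some p := by
  induction l with
  | nil => simp at hmem
  | cons q t ih =>
    rcases List.pairwise_cons.1 hpw with ⟨hq, hpt⟩
    by_cases hpmem : p ∈ t
    · have hfm : pvFmin key t = some p := by
        apply ih hpt hpmem
        · intro r hr; exact hmin r (List.mem_cons_of_mem _ hr)
        · intro r hr hR; exact hstrict r (List.mem_cons_of_mem _ hr) hR
      have hlt : key p < key q := hstrict q (List.mem_cons_self) (hq p hpmem)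
      simp only [pvFmin, hfm]
      have : ¬ key q ≤ key p := by omega
      simp [this]
    · have hpq : p = q := by
        rcases List.mem_cons.1 hmem with h | h
        · exact h
        · exact absurd h hpmem
      subst hpq
      cases ht : pvFmin key t with
      | none => simp [pvFmin, ht]
      | some r =>
        have hr : r ∈ t := pvFmin_mem key t r ht
        have : key p ≤ key r := hmin r (List.mem_cons_of_mem _ hr)
        simp [pvFmin, ht, this]

-- the list of index pairs A iterates over, in A's order
def pvPairs (n : Int) : List (Int × Int) :=
  (PySem.List.pyRange 0 n 1).flatMap (fun x => (PySem.List.pyRange (x + 1) n 1).map (fun i => (x, i)))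

theorem mem_pvPairs (n : Int) (q : Int × Int) :
    q ∈ pvPairs n ↔ 0 ≤ q.1 ∧ q.1 < q.2 ∧ q.2 < n := by
  unfold pvPairs
  simp only [List.mem_flatMap, List.mem_map, PySem.List.mem_pyRange_one]
  constructor
  · rintro ⟨x, ⟨hx0, hxn⟩, i, ⟨hi1, hi2⟩, rfl⟩
    exact ⟨hx0, by omega, hi2⟩
  · rintro ⟨h0, h1, h2⟩
    exact ⟨q.1, ⟨h0, by omega⟩, q.2, ⟨by omega, h2⟩, rfl⟩

theorem pairwise_pvPairs (n : Int) :
    (pvPairs n).Pairwise (fun p q => p.1 < q.1 ∨ (p.1 = q.1 ∧ p.2 < q.2)) := by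
  unfold pvPairs
  rw [List.pairwise_flatMap]
  constructor
  · intro x hx
    apply List.Pairwise.map
    · intro a b hab
      exact Or.inr ⟨rfl, hab⟩
    · exact PySem.List.pairwise_lt_pyRange_one _ _
  · apply List.Pairwise.imp ?_ (PySem.List.pairwise_lt_pyRange_one 0 n)
    intro a b hab p hp q hq
    simp only [List.mem_map] at hp hq
    rcases hp with ⟨i, _, rfl⟩
    rcases hq with ⟨j, _, rfl⟩
    exact Or.inl hab

def pvKey (lista : List Int) (q : Int × Int) : Int :=
  if PySem.List.pyGetD lista q.2 0 ≤ PySem.List.pyGetD lista q.1 0 then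
    PySem.List.pyGetD lista q.1 0 - PySem.List.pyGetD lista q.2 0
  else
    PySem.List.pyGetD lista q.2 0 - PySem.List.pyGetD lista q.1 0

def pvOut (lista : List Int) (q : Int × Int) : List Int :=
  [PySem.List.pyGetD lista q.1 0, PySem.List.pyGetD lista q.2 0]

-- fold of an 'update on strictly smaller key' step = first minimum
theorem pvFmin_eq_none {α : Type} (key : α → Int) (l : List α) :
    pvFmin key l = none ↔ l = [] := by
  cases l with
  | nil => simp [pvFmin]
  | cons a t =>
    simp only [pvFmin]
    cases h : pvFmin key t with
    | none => simp
    | some p => by_cases hk : key a ≤ key p <;> simp [hk]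

theorem pv_foldl_if_lt {α : Type} (key : α → Int) (out : α → List Int) (l : List α)
    (init : Int × List Int) :
    l.foldl (fun s q => if key q < s.1 then (key q, out q) else s) init =
      (match pvFmin key l with
      | none => init
      | some p => if key p < init.1 then (key p, out p) else init) := by
  induction l generalizing init with
  | nil => simp [pvFmin]
  | cons q t ih =>
    simp only [List.foldl_cons, pvFmin]
    rw [ih]
    cases ht : pvFmin key t with
    | none =>
      have : t = [] := (pvFmin_eq_none key t).1 ht
      subst this
      simp
    | some p =>
      by_cases hqp : key q ≤ key p
      · simp only [if_pos hqp]
        by_cases hq : key q < init.1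
        · simp only [if_pos hq]
          have : ¬ key p < key q := by omega
          simp [this]
        · simp only [if_neg hq]
          have : ¬ key p < init.1 := by omega
          simp [this]
      · simp only [if_neg hqp]
        by_cases hq : key q < init.1
        · simp only [if_pos hq]
          have h1 : key p < key q := by omega
          have h2 : key p < init.1 := by omega
          simp [h1, h2]
        · simp [hq]

theorem pv_setpair (a b ax ai : Int) :
    PySem.List.pySetD (PySem.List.pySetD [a, b] 0 ax) 1 ai = [ax, ai] := rfl

theorem pv_step_eq (lista : List Int) (q : Int × Int) (s : Int × List Int) :
    (if PySem.List.pyGetD lista q.1 0 > PySem.List.pyGetD lista q.2 0 then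
      (if PySem.List.pyGetD lista q.1 0 - PySem.List.pyGetD lista q.2 0 < s.1 then
        (PySem.List.pyGetD lista q.1 0 - PySem.List.pyGetD lista q.2 0,
         PySem.List.pySetD (PySem.List.pySetD s.2 0 (PySem.List.pyGetD lista q.1 0)) 1 (PySem.List.pyGetD lista q.2 0))
      else s)
    else if PySem.List.pyGetD lista q.1 0 < PySem.List.pyGetD lista q.2 0 then
      (if PySem.List.pyGetD lista q.2 0 - PySem.List.pyGetD lista q.1 0 < s.1 then
        (PySem.List.pyGetD lista q.2 0 - PySem.List.pyGetD lista q.1 0,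
         PySem.List.pySetD (PySem.List.pySetD s.2 0 (PySem.List.pyGetD lista q.1 0)) 1 (PySem.List.pyGetD lista q.2 0))
      else s)
    else
      (if PySem.List.pyGetD lista q.1 0 - PySem.List.pyGetD lista q.2 0 < s.1 then
        (PySem.List.pyGetD lista q.1 0 - PySem.List.pyGetD lista q.2 0,
         PySem.List.pySetD (PySem.List.pySetD s.2 0 (PySem.List.pyGetD lista q.1 0)) 1 (PySem.List.pyGetD lista q.2 0))
      else s)) =
    (if pvKey lista q < s.1 then
      (pvKey lista q,
        PySem.List.pySetD (PySem.List.pySetD s.2 0 (PySem.List.pyGetD lista q.1 0)) 1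
          (PySem.List.pyGetD lista q.2 0))
    else s) := by
  unfold pvKey
  split_ifs <;> first | rfl | omega 

theorem pv_fold_norm (lista : List Int) (l : List (Int × Int)) (init : Int × List Int)
    (hlen : init.2.length = 2) :
    l.foldl (fun s q => if pvKey lista q < s.1 then
        (pvKey lista q,
          PySem.List.pySetD (PySem.List.pySetD s.2 0 (PySem.List.pyGetD lista q.1 0)) 1
            (PySem.List.pyGetD lista q.2 0))
      else s) init =
    l.foldl (fun s q => if pvKey lista q < s.1 then (pvKey lista q, pvOut lista q) else s) init := by
  induction l generalizing init with
  | nil => rfl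
  | cons q t ih =>
    obtain ⟨m, par⟩ := init
    match par, hlen with
    | [a, b], _ =>
      simp only [List.foldl_cons]
      by_cases h : pvKey lista q < m
      · simp only [h, if_pos, pv_setpair]
        exact ih _ rfl
      · simp only [h, if_neg, not_false_iff]
        exact ih _ (by simp)

theorem parproximo_eq (lista : List Int) :
    parproximo lista =
      (match pvFmin (pvKey lista) (pvPairs (PySem.List.len lista)) with
      | none => [0, 0]
      | some p =>
          if pvKey lista p < (1000000000000000000000000000000000000000000000000000 : Int) then
            pvOut lista p
          else [0, 0]) := by
  have hflat :
      parproximo lista =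
      ((pvPairs (PySem.List.len lista)).foldl
          (fun (s : Int × List Int) q => if pvKey lista q < s.1 then
            (pvKey lista q,
              PySem.List.pySetD (PySem.List.pySetD s.2 0 (PySem.List.pyGetD lista q.1 0)) 1
                (PySem.List.pyGetD lista q.2 0))
          else s)
          ((1000000000000000000000000000000000000000000000000000 : Int), ([0, 0] : List Int))).2 := by
    unfold parproximo pvPairs
    simp only []
    rw [List.foldl_flatMap]
    congr 1
    congr 1
    funext s x
    rw [List.foldl_map]
    congr 1
    funext s' i
    exact pv_step_eq lista (x, i) s'
  rw [hflat, pv_fold_norm lista _ _ rfl, pv_foldl_if_lt]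
  cases h : pvFmin (pvKey lista) (pvPairs (PySem.List.len lista)) with
  | none => rfl
  | some p =>
    by_cases hk : pvKey lista p < (1000000000000000000000000000000000000000000000000000 : Int) <;>
      simp [hk]

theorem pvKey_toNat (lista : List Int) (q : Int × Int) (h1 : 0 ≤ q.1) (h2 : 0 ≤ q.2) :
    pvKey lista q = pvKeyN lista q.1.toNat q.2.toNat := by
  obtain ⟨a, b⟩ := q
  simp only at h1 h2
  obtain ⟨x, rfl⟩ : ∃ x : Nat, a = ↑x := ⟨a.toNat, by omega⟩
  obtain ⟨i, rfl⟩ : ∃ i : Nat, b = ↑i := ⟨b.toNat, by omega⟩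
  unfold pvKey pvKeyN pvVal
  simp

theorem pvVal_mem (lista : List Int) (x : Nat) (h : x < lista.length) : pvVal lista x ∈ lista := by
  unfold pvVal
  rw [List.getD_eq_getElem lista 0 h]
  exact List.getElem_mem _

theorem pv_dom_bound (lista : List Int) (hdom : Dom_parproximo lista) (v : Int) (hv : v ∈ lista) :
    -2147483648 ≤ v ∧ v ≤ 2147483648 := by
  unfold Dom_parproximo at hdom
  rw [List.all_eq_true] at hdom
  have := hdom v hv
  simpa [pvDomInt] using this

theorem A_val (lista : List Int) (hdom : Dom_parproximo lista) (d : Int)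
    (hdle : ∀ x i : Nat, x < i → i < lista.length → d ≤ pvKeyN lista x i)
    (X I : Nat) (hXI : X < I) (hIn : I < lista.length) (hkey : pvKeyN lista X I = d)
    (hXleast : ∀ x' i' : Nat, x' < X → x' < i' → i' < lista.length → pvKeyN lista x' i' ≠ d)
    (hIleast : ∀ i' : Nat, X < i' → i' < I → pvKeyN lista X i' ≠ d) :
    parproximo lista = [pvVal lista X, pvVal lista I] := by
  have hkXI : pvKey lista ((X : Int), (I : Int)) = d := by
    rw [pvKey_toNat lista _ (show (0:Int) ≤ (X:Int) from by exact_mod_cast Nat.zero_le X) (show (0:Int) ≤ (I:Int) from by exact_mod_cast Nat.zero_le I)]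
    simpa using hkey
  have hfm : pvFmin (pvKey lista) (pvPairs (PySem.List.len lista)) = some ((X : Int), (I : Int)) := by
    apply pvFmin_eq_of_pairwise (fun p q => p.1 < q.1 ∨ (p.1 = q.1 ∧ p.2 < q.2)) _ _ _
      (pairwise_pvPairs _)
    · rw [mem_pvPairs]
      refine ⟨show (0:Int) ≤ (X:Int) from by exact_mod_cast Nat.zero_le X,
        show (X:Int) < (I:Int) from by exact_mod_cast hXI, ?_⟩
      show (I:Int) < PySem.List.len lista
      simp only [PySem.List.len_eq]
      exact_mod_cast hIn
    · intro q hq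
      rw [mem_pvPairs] at hq
      simp only [PySem.List.len_eq] at hq
      rw [hkXI, pvKey_toNat lista q (by omega) (by omega)]
      exact hdle q.1.toNat q.2.toNat (by omega) (by omega)
    · intro q hq hR
      rw [mem_pvPairs] at hq
      simp only [PySem.List.len_eq] at hq
      rw [hkXI, pvKey_toNat lista q (by omega) (by omega)]
      have hge := hdle q.1.toNat q.2.toNat (by omega) (by omega)
      have hne : pvKeyN lista q.1.toNat q.2.toNat ≠ d := by
        rcases hR with hL | ⟨hE, hL2⟩
        · exact hXleast q.1.toNat q.2.toNat (by simp at hL; omega) (by omega) (by omega)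
        · have hq1 : q.1.toNat = X := by simp at hE; omega
          rw [hq1]
          exact hIleast q.2.toNat (by omega) (by simp at hL2; omega)
      omega
  rw [parproximo_eq, hfm]
  have hvX := pv_dom_bound lista hdom (pvVal lista X) (pvVal_mem lista X (by omega))
  have hvI := pv_dom_bound lista hdom (pvVal lista I) (pvVal_mem lista I hIn)
  have hklt : pvKey lista ((X : Int), (I : Int)) <
      (1000000000000000000000000000000000000000000000000000 : Int) := by
    rw [hkXI] at *
    rw [← hkey]
    unfold pvKeyN
    split_ifs <;> omega
  simp only [hklt, if_pos]
  unfold pvOut pvVal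
  simp

def pvLeastOpt (S : Int → Prop) : Option Int → Prop
  | none => ∀ j, ¬ S j
  | some j => S j ∧ ∀ t, S t → j ≤ t

theorem pvLeastOpt_congr (S T : Int → Prop) (o : Option Int) (h : ∀ j, S j ↔ T j)
    (hS : pvLeastOpt S o) : pvLeastOpt T o := by
  cases o with
  | none => intro j hj; exact hS j ((h j).2 hj)
  | some j => exact ⟨(h j).1 hS.1, fun t ht => hS.2 t ((h t).2 ht)⟩

def pvCombine : Option Int → Option Int → Option Int
  | a, none => a
  | none, some b => some b
  | some a, some b => if a < b then some a else some b

theorem pvLeastOpt_combine (S1 S2 : Int → Prop) (o1 o2 : Option Int)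
    (h1 : pvLeastOpt S1 o1) (h2 : pvLeastOpt S2 o2) :
    pvLeastOpt (fun j => S1 j ∨ S2 j) (pvCombine o1 o2) := by
  unfold pvCombine
  cases o1 with
  | none =>
    cases o2 with
    | none => intro j hj; rcases hj with hj | hj; exacts [h1 j hj, h2 j hj]
    | some b =>
      refine ⟨Or.inr h2.1, fun t ht => ?_⟩
      rcases ht with ht | ht
      · exact absurd ht (h1 t)
      · exact h2.2 t ht
  | some a =>
    cases o2 with
    | none =>
      refine ⟨Or.inl h1.1, fun t ht => ?_⟩
      rcases ht with ht | ht
      · exact h1.2 t ht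
      · exact absurd ht (h2 t)
    | some b =>
      by_cases hab : a < b
      · simp only [if_pos hab]
        refine ⟨Or.inl h1.1, fun t ht => ?_⟩
        rcases ht with ht | ht
        · exact h1.2 t ht
        · exact le_trans (le_of_lt hab) (h2.2 t ht)
      · simp only [if_neg hab]
        refine ⟨Or.inr h2.1, fun t ht => ?_⟩
        rcases ht with ht | ht
        · exact le_trans (by omega) (h1.2 t ht)
        · exact h2.2 t ht

theorem pvVal_pyGetD (lista : List Int) (j : Int) (hj : 0 ≤ j) :
    PySem.List.pyGetD lista j 0 = pvVal lista j.toNat := by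
  obtain ⟨m, rfl⟩ : ∃ m : Nat, j = (m : Int) := ⟨j.toNat, by omega⟩
  simp [pvVal]

theorem pvBWD (lista : List Int) (d : Int) (hd0 : 0 ≤ d)
    (X I : Nat) (hXI : X < I) (hIn : I < lista.length)
    (hkey : pvKeyN lista X I = d)
    (hXleast : ∀ x' i' : Nat, x' < X → x' < i' → i' < lista.length → pvKeyN lista x' i' ≠ d)
    (hIleast : ∀ i' : Nat, X < i' → i' < I → pvKeyN lista X i' ≠ d) :
    ∀ (k : Nat), k ≤ lista.length → ∀ (D : PySem.Dict Int Int) (ans0 : List Int),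
      (∀ v : Int, pvLeastOpt
          (fun j => (k : Int) - 1 < j ∧ j < (lista.length : Int) ∧ PySem.List.pyGetD lista j 0 = v)
          (D.get? v)) →
      ((PySem.List.pyRange ((k : Int) - 1) (-1) (-1)).foldl (pvStep lista d) (D, ans0)).2 =
        if (X : Int) ≤ (k : Int) - 1 then [pvVal lista X, pvVal lista I] else ans0 := by
  intro k
  induction k with
  | zero =>
    intro _ D ans0 _
    rw [PySem.List.pyRange_neg_one_eq_nil (by omega)]
    simp only [List.foldl_nil]
    rw [if_neg (by push_cast; omega)]
  | succ k ih =>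
    intro hk D ans0 hinv
    have hinv' : ∀ v : Int, pvLeastOpt
        (fun j => (k : Int) < j ∧ j < (lista.length : Int) ∧ PySem.List.pyGetD lista j 0 = v)
        (D.get? v) := by
      intro v
      apply pvLeastOpt_congr _ _ _ ?_ (hinv v)
      intro j
      constructor
      · rintro ⟨h1, h2, h3⟩; exact ⟨by push_cast at h1; omega, h2, h3⟩
      · rintro ⟨h1, h2, h3⟩; exact ⟨by push_cast; omega, h2, h3⟩
    have hcast : (((k : Nat) + 1 : Nat) : Int) - 1 = (k : Int) := by push_cast; ring
    rw [hcast, PySem.List.pyRange_neg_one_cons (by omega : (-1 : Int) < (k : Int))]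
    simp only [List.foldl_cons]
    have hkn : k < lista.length := by omega
    have hvval : PySem.List.pyGetD lista (k : Int) 0 = pvVal lista k := by simp [pvVal]
    have hcomb := pvLeastOpt_combine _ _ _ _
      (hinv' (PySem.List.pyGetD lista (k : Int) 0 - d)) (hinv' (PySem.List.pyGetD lista (k : Int) 0 + d))
    have hiOpt : pvLeastOpt
        (fun j => (k : Int) < j ∧ j < (lista.length : Int) ∧ pvKeyN lista k j.toNat = d)
        (pvCombine (D.get? (PySem.List.pyGetD lista (k : Int) 0 - d))
          (D.get? (PySem.List.pyGetD lista (k : Int) 0 + d))) := by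
      apply pvLeastOpt_congr _ _ _ ?_ hcomb
      intro j
      constructor
      · rintro (⟨h1, h2, h3⟩ | ⟨h1, h2, h3⟩) <;>
          refine ⟨h1, h2, ?_⟩ <;>
          · rw [pvVal_pyGetD lista j (by omega), hvval] at h3
            unfold pvKeyN
            split_ifs <;> omega
      · rintro ⟨h1, h2, h3⟩
        unfold pvKeyN at h3
        rw [hvval, pvVal_pyGetD lista j (by omega)]
        split_ifs at h3 <;> omega
    have hstep : pvStep lista d (D, ans0) (k : Int) =
        (D.insert (PySem.List.pyGetD lista (k : Int) 0) (k : Int),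
         match pvCombine (D.get? (PySem.List.pyGetD lista (k : Int) 0 - d))
             (D.get? (PySem.List.pyGetD lista (k : Int) 0 + d)) with
         | none => ans0
         | some j => [PySem.List.pyGetD lista (k : Int) 0, PySem.List.pyGetD lista j 0]) := by
      rfl
    rw [hstep]
    have hinv2 : ∀ w : Int, pvLeastOpt
        (fun j => (k : Int) - 1 < j ∧ j < (lista.length : Int) ∧ PySem.List.pyGetD lista j 0 = w)
        ((D.insert (PySem.List.pyGetD lista (k : Int) 0) (k : Int)).get? w) := by
      intro w
      rw [PySem.Dict.get?_insert]
      by_cases hw : w = PySem.List.pyGetD lista (k : Int) 0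
      · rw [if_pos hw]
        exact ⟨⟨by omega, by omega, hw.symm⟩, fun t ht => by omega⟩
      · rw [if_neg hw]
        apply pvLeastOpt_congr _ _ _ ?_ (hinv' w)
        intro j
        constructor
        · rintro ⟨h1, h2, h3⟩; exact ⟨by omega, h2, h3⟩
        · rintro ⟨h1, h2, h3⟩
          refine ⟨?_, h2, h3⟩
          by_cases hj : j = (k : Int)
          · exfalso; exact hw (by rw [← hj]; exact h3.symm)
          · omega
    rw [ih (by omega) _ _ hinv2]
    by_cases hX : (X : Int) ≤ (k : Int) - 1
    · rw [if_pos hX, if_pos (by omega)]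
    · rw [if_neg hX]
      by_cases hXk : X = k
      · rw [if_pos (by omega)]
        cases hi : pvCombine (D.get? (PySem.List.pyGetD lista (k : Int) 0 - d))
            (D.get? (PySem.List.pyGetD lista (k : Int) 0 + d)) with
        | none =>
          exfalso
          rw [hi] at hiOpt
          exact hiOpt (I : Int) ⟨by omega, by exact_mod_cast hIn, by simpa using (hXk ▸ hkey)⟩
        | some j =>
          rw [hi] at hiOpt
          obtain ⟨⟨hj1, hj2, hj3⟩, hjle⟩ := hiOpt
          have hIj : j = (I : Int) := by
            have hle1 : j ≤ (I : Int) :=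
              hjle (I : Int) ⟨by omega, by exact_mod_cast hIn, by simpa using (hXk ▸ hkey)⟩
            have hge : I ≤ j.toNat := by
              by_contra hlt
              exact hIleast j.toNat (by omega) (by omega) (by rw [← hXk] at hj3; exact hj3)
            omega
          subst hIj
          simp only []
          rw [hvval, pvVal_pyGetD lista (I : Int) (by omega), hXk]
          simp
      · rw [if_neg (by omega)]
        cases hi : pvCombine (D.get? (PySem.List.pyGetD lista (k : Int) 0 - d))
            (D.get? (PySem.List.pyGetD lista (k : Int) 0 + d)) with
        | none => rfl
        | some j =>
          exfalso
          rw [hi] at hiOpt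
          obtain ⟨⟨hj1, hj2, hj3⟩, _⟩ := hiOpt
          exact hXleast k j.toNat (by omega) (by omega) (by omega) hj3

theorem pv_exists_index_of_mem (l : List Int) (u : Int) (h : u ∈ l) :
    ∃ x : Nat, x < l.length ∧ l.getD x 0 = u := by
  obtain ⟨x, hx, he⟩ := List.mem_iff_getElem.1 h
  exact ⟨x, hx, by rw [List.getD_eq_getElem l 0 hx, he]⟩

theorem pv_two_indices_of_count (l : List Int) (u : Int) (h : 2 ≤ l.count u) :
    ∃ x i : Nat, x < i ∧ i < l.length ∧ l.getD x 0 = u ∧ l.getD i 0 = u := by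
  induction l with
  | nil => simp at h
  | cons b t ih =>
    by_cases hbu : b = u
    · subst hbu
      have hmem : b ∈ t := by
        rw [← List.count_pos_iff]
        rw [List.count_cons_self] at h
        omega
      obtain ⟨x, hx, he⟩ := pv_exists_index_of_mem t b hmem
      exact ⟨0, x + 1, by omega, by simp; omega, by simp, by simpa using he⟩
    · have ht : 2 ≤ t.count u := by
        rw [List.count_cons] at h
        have hne : (b == u) = false := beq_eq_false_iff_ne.2 hbu
        rw [hne] at h
        simp at h
        omega
      obtain ⟨x, i, h1, h2, h3, h4⟩ := ih ht
      exact ⟨x + 1, i + 1, by omega, by simp; omega, by simpa using h3, by simpa using h4⟩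

theorem pv_count_of_two_indices (l : List Int) (x i : Nat) (hxi : x < i) (hi : i < l.length)
    (he : l.getD x 0 = l.getD i 0) : 2 ≤ l.count (l.getD x 0) := by
  induction l generalizing x i with
  | nil => simp at hi
  | cons b t ih =>
    cases x with
    | zero =>
      cases i with
      | zero => omega
      | succ i' =>
        simp only [List.getD_cons_zero, List.getD_cons_succ] at he ⊢
        have hi' : i' < t.length := by simp at hi; omega
        have hmem : b ∈ t := by
          rw [he, List.getD_eq_getElem t 0 hi']
          exact List.getElem_mem _
        have := List.count_pos_iff.2 hmem
        rw [List.count_cons_self]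
        omega
    | succ x' =>
      cases i with
      | zero => omega
      | succ i' =>
        simp only [List.getD_cons_succ] at he ⊢
        have := ih x' i' (by omega) (by simp at hi; omega) he
        calc 2 ≤ t.count (t.getD x' 0) := this
        _ ≤ (b :: t).count (t.getD x' 0) := by
            rw [List.count_cons]
            omega

theorem pv_pyGetD_succ (l : List Int) (k : Nat) :
    PySem.List.pyGetD l ((k : Int) + 1) 0 = l.getD (k + 1) 0 := by
  rw [show ((k : Int) + 1) = (((k + 1 : Nat) : Nat) : Int) by push_cast; ring,
    PySem.List.pyGetD_natCast]

theorem pv_vals_mono (lista : List Int) (p q : Nat) (hpq : p ≤ q) (hq : q < lista.length) :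
    (PySem.List.sorted lista (fun v => v) false).getD p 0 ≤
      (PySem.List.sorted lista (fun v => v) false).getD q 0 := by
  have hlen : (PySem.List.sorted lista (fun v => v) false).length = lista.length :=
    PySem.List.length_sorted lista (fun v => v) false
  have hq' : q < (PySem.List.sorted lista (fun v => v) false).length := by omega
  rw [List.getD_eq_getElem _ 0 (by omega), List.getD_eq_getElem _ 0 hq']
  exact PySem.List.sorted_id_getElem_mono lista hpq hq'

theorem pvGap_spec (lista : List Int) (hn2 : 2 ≤ lista.length) :
    (∃ k : Nat, k + 1 < lista.length ∧ pvGap lista =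
        (PySem.List.sorted lista (fun v => v) false).getD (k + 1) 0 -
        (PySem.List.sorted lista (fun v => v) false).getD k 0)
    ∧ (∀ k : Nat, k + 1 < lista.length → pvGap lista ≤
        (PySem.List.sorted lista (fun v => v) false).getD (k + 1) 0 -
        (PySem.List.sorted lista (fun v => v) false).getD k 0) := by
  unfold pvGap
  simp only []
  obtain ⟨m, hm⟩ : ∃ m, PySem.List.min?
      ((PySem.List.pyRange 0 (PySem.List.len lista - 1) 1).map (fun k =>
        PySem.List.pyGetD (PySem.List.sorted lista (fun v => v) false) (k + 1) 0 -
        PySem.List.pyGetD (PySem.List.sorted lista (fun v => v) false) k 0)) (fun z => z) = some m := by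
    cases h : PySem.List.min?
        ((PySem.List.pyRange 0 (PySem.List.len lista - 1) 1).map (fun k =>
          PySem.List.pyGetD (PySem.List.sorted lista (fun v => v) false) (k + 1) 0 -
          PySem.List.pyGetD (PySem.List.sorted lista (fun v => v) false) k 0)) (fun z => z) with
    | none =>
      rw [PySem.List.min?_eq_none_iff] at h
      have : ((PySem.List.pyRange 0 (PySem.List.len lista - 1) 1).map (fun k =>
          PySem.List.pyGetD (PySem.List.sorted lista (fun v => v) false) (k + 1) 0 -
          PySem.List.pyGetD (PySem.List.sorted lista (fun v => v) false) k 0)).length ≠ 0 := by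
        rw [List.length_map, PySem.List.length_pyRange_one]
        simp only [PySem.List.len_eq]
        omega
      rw [h] at this
      simp at this
    | some m => exact ⟨m, rfl⟩
  rw [hm]
  simp only [Option.getD_some]
  constructor
  · have := PySem.List.min?_mem hm
    rw [List.mem_map] at this
    obtain ⟨kI, hkI, he⟩ := this
    rw [PySem.List.mem_pyRange_one] at hkI
    simp only [PySem.List.len_eq] at hkI
    obtain ⟨k, rfl⟩ : ∃ k : Nat, kI = (k : Int) := ⟨kI.toNat, by omega⟩
    refine ⟨k, by omega, ?_⟩
    rw [← he, pv_pyGetD_succ]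
    simp
  · intro k hk
    have hmem : PySem.List.pyGetD (PySem.List.sorted lista (fun v => v) false) ((k : Int) + 1) 0 -
        PySem.List.pyGetD (PySem.List.sorted lista (fun v => v) false) (k : Int) 0 ∈
        ((PySem.List.pyRange 0 (PySem.List.len lista - 1) 1).map (fun k =>
          PySem.List.pyGetD (PySem.List.sorted lista (fun v => v) false) (k + 1) 0 -
          PySem.List.pyGetD (PySem.List.sorted lista (fun v => v) false) k 0)) := by
      rw [List.mem_map]
      refine ⟨(k : Int), ?_, rfl⟩
      rw [PySem.List.mem_pyRange_one]
      simp only [PySem.List.len_eq]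
      omega
    have := PySem.List.min?_isMin hm _ hmem
    simp only at this
    calc m ≤ _ := this
    _ = _ := by
        rw [pv_pyGetD_succ]
        simp

theorem pvGap_nonneg (lista : List Int) (hn2 : 2 ≤ lista.length) : 0 ≤ pvGap lista := by
  obtain ⟨⟨k, hk, he⟩, -⟩ := pvGap_spec lista hn2
  have := pv_vals_mono lista k (k + 1) (by omega) hk
  omega

theorem pv_gap_le_sub (lista : List Int) (hn2 : 2 ≤ lista.length) (u w : Int)
    (hu : u ∈ lista) (hw : w ∈ lista) (huw : u < w) : pvGap lista ≤ w - u := by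
  obtain ⟨-, hle⟩ := pvGap_spec lista hn2
  have hu' : u ∈ PySem.List.sorted lista (fun v => v) false :=
    (PySem.List.mem_sorted lista (fun v => v) false u).2 hu
  have hw' : w ∈ PySem.List.sorted lista (fun v => v) false :=
    (PySem.List.mem_sorted lista (fun v => v) false w).2 hw
  have hlen : (PySem.List.sorted lista (fun v => v) false).length = lista.length :=
    PySem.List.length_sorted lista (fun v => v) false
  obtain ⟨p, hp, hpe⟩ := pv_exists_index_of_mem _ u hu'
  obtain ⟨q, hq, hqe⟩ := pv_exists_index_of_mem _ w hw'
  have hpq : p < q := by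
    by_contra hle2
    have := pv_vals_mono lista q p (by omega) (by omega)
    omega
  have h1 := hle p (by omega)
  have h2 := pv_vals_mono lista (p + 1) q (by omega) (by omega)
  omega

theorem pv_gap_nonpos_of_dup (lista : List Int) (hn2 : 2 ≤ lista.length) (u : Int)
    (h2 : 2 ≤ lista.count u) : pvGap lista ≤ 0 := by
  obtain ⟨-, hle⟩ := pvGap_spec lista hn2
  have hcnt : 2 ≤ (PySem.List.sorted lista (fun v => v) false).count u := by
    rw [List.Perm.count_eq (PySem.List.sorted_perm lista (fun v => v) false) u]
    exact h2
  have hlen : (PySem.List.sorted lista (fun v => v) false).length = lista.length :=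
    PySem.List.length_sorted lista (fun v => v) false
  obtain ⟨p, q, hpq, hq, hpe, hqe⟩ := pv_two_indices_of_count _ u hcnt
  have hm1 := pv_vals_mono lista p (p + 1) (by omega) (by omega)
  have hm2 := pv_vals_mono lista (p + 1) q (by omega) (by omega)
  have := hle p (by omega)
  omega

theorem pvGap_le (lista : List Int) (hn2 : 2 ≤ lista.length) :
    ∀ x i : Nat, x < i → i < lista.length → pvGap lista ≤ pvKeyN lista x i := by
  intro x i hxi hi
  unfold pvKeyN
  rcases lt_trichotomy (pvVal lista x) (pvVal lista i) with hlt | heq | hgt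
  · rw [if_neg (by omega)]
    exact pv_gap_le_sub lista hn2 _ _ (pvVal_mem lista x (by omega)) (pvVal_mem lista i hi) hlt
  · rw [if_pos (by omega)]
    have := pv_gap_nonpos_of_dup lista hn2 (pvVal lista x)
      (pv_count_of_two_indices lista x i hxi hi heq)
    omega
  · rw [if_pos (by omega)]
    have := pv_gap_le_sub lista hn2 _ _ (pvVal_mem lista i hi) (pvVal_mem lista x (by omega)) hgt
    omega

theorem pvGap_achieved (lista : List Int) (hn2 : 2 ≤ lista.length) :
    ∃ x i : Nat, x < i ∧ i < lista.length ∧ pvKeyN lista x i = pvGap lista := by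
  obtain ⟨⟨k, hk, he⟩, -⟩ := pvGap_spec lista hn2
  have hlen : (PySem.List.sorted lista (fun v => v) false).length = lista.length :=
    PySem.List.length_sorted lista (fun v => v) false
  by_cases hdup : (PySem.List.sorted lista (fun v => v) false).getD k 0 =
      (PySem.List.sorted lista (fun v => v) false).getD (k + 1) 0
  · have hcv : 2 ≤ (PySem.List.sorted lista (fun v => v) false).count
        ((PySem.List.sorted lista (fun v => v) false).getD k 0) :=
      pv_count_of_two_indices _ k (k + 1) (by omega) (by omega) hdup
    have hcl : 2 ≤ lista.count ((PySem.List.sorted lista (fun v => v) false).getD k 0) := by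
      rw [← List.Perm.count_eq (PySem.List.sorted_perm lista (fun v => v) false)]
      exact hcv
    obtain ⟨x, i, hxi, hi, hxe, hie⟩ := pv_two_indices_of_count lista _ hcl
    refine ⟨x, i, hxi, hi, ?_⟩
    unfold pvKeyN pvVal
    rw [hxe, hie, if_pos le_rfl]
    omega
  · have hmono := pv_vals_mono lista k (k + 1) (by omega) hk
    have hlt : (PySem.List.sorted lista (fun v => v) false).getD k 0 <
        (PySem.List.sorted lista (fun v => v) false).getD (k + 1) 0 := by omega
    have humem : (PySem.List.sorted lista (fun v => v) false).getD k 0 ∈ lista := by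
      rw [← PySem.List.mem_sorted lista (fun v => v) false]
      exact pvVal_mem _ k (by omega)
    have hwmem : (PySem.List.sorted lista (fun v => v) false).getD (k + 1) 0 ∈ lista := by
      rw [← PySem.List.mem_sorted lista (fun v => v) false]
      exact pvVal_mem _ (k + 1) (by omega)
    obtain ⟨x0, hx0, hx0e⟩ := pv_exists_index_of_mem lista _ humem
    obtain ⟨i0, hi0, hi0e⟩ := pv_exists_index_of_mem lista _ hwmem
    have hne : x0 ≠ i0 := by
      intro hcontra
      rw [hcontra, hi0e] at hx0e
      omega
    rcases Nat.lt_or_ge x0 i0 with hlt2 | hge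
    · refine ⟨x0, i0, hlt2, hi0, ?_⟩
      unfold pvKeyN pvVal
      rw [hx0e, hi0e, if_neg (by omega)]
      omega
    · refine ⟨i0, x0, by omega, hx0, ?_⟩
      unfold pvKeyN pvVal
      rw [hx0e, hi0e, if_pos (by omega)]
      omega

theorem B_val (lista : List Int) (hn2 : 2 ≤ lista.length)
    (X I : Nat) (hXI : X < I) (hIn : I < lista.length)
    (hkey : pvKeyN lista X I = pvGap lista)
    (hXleast : ∀ x' i' : Nat, x' < X → x' < i' → i' < lista.length →
      pvKeyN lista x' i' ≠ pvGap lista)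
    (hIleast : ∀ i' : Nat, X < i' → i' < I → pvKeyN lista X i' ≠ pvGap lista) :
    parproximo_alt lista = [pvVal lista X, pvVal lista I] := by
  unfold parproximo_alt
  simp only []
  rw [if_neg (by simp only [PySem.List.len_eq]; omega)]
  have hinv0 : ∀ v : Int, pvLeastOpt
      (fun j => (lista.length : Int) - 1 < j ∧ j < (lista.length : Int) ∧
        PySem.List.pyGetD lista j 0 = v)
      ((PySem.Dict.empty : PySem.Dict Int Int).get? v) := by
    intro v
    have : (PySem.Dict.empty : PySem.Dict Int Int).get? v = none := by
      simp [PySem.Dict.get?, PySem.Dict.empty]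
    rw [this]
    intro j hj
    omega
  have := pvBWD lista (pvGap lista) (pvGap_nonneg lista hn2) X I hXI hIn hkey hXleast hIleast
    lista.length le_rfl PySem.Dict.empty [0, 0] hinv0
  simp only [PySem.List.len_eq]
  rw [this]
  rw [if_pos (by omega)]

theorem pvPairs_eq_nil (n : Int) (hn : n < 2) : pvPairs n = [] := by
  rw [List.eq_nil_iff_forall_not_mem]
  intro q hq
  rw [mem_pvPairs] at hq
  omega

-- ===== VERDICT (by name: the statement is the Claim_ definition above) =====
theorem parproximo_spec : Claim_equal_parproximo := by
  intro lista hdom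
  unfold Spec_parproximo
  by_cases hn : 2 ≤ lista.length
  · have hd0 := pvGap_nonneg lista hn
    have hle := pvGap_le lista hn
    have hach := pvGap_achieved lista hn
    haveI : DecidablePred (fun x : Nat =>
        ∃ i : Nat, x < i ∧ i < lista.length ∧ pvKeyN lista x i = pvGap lista) :=
      Classical.decPred _
    have hex : ∃ x : Nat, ∃ i : Nat, x < i ∧ i < lista.length ∧ pvKeyN lista x i = pvGap lista := by
      obtain ⟨x0, i0, h1, h2, h3⟩ := hach
      exact ⟨x0, i0, h1, h2, h3⟩
    have hexI := Nat.find_spec hex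
    haveI : DecidablePred (fun i : Nat =>
        Nat.find hex < i ∧ i < lista.length ∧ pvKeyN lista (Nat.find hex) i = pvGap lista) :=
      Classical.decPred _
    obtain ⟨hXI, hIn, hkey⟩ := Nat.find_spec hexI
    have hXleast : ∀ x' i' : Nat, x' < Nat.find hex → x' < i' → i' < lista.length →
        pvKeyN lista x' i' ≠ pvGap lista := by
      intro x' i' hx' hxi' hi' hcontra
      exact Nat.find_min hex hx' ⟨i', hxi', hi', hcontra⟩
    have hIleast : ∀ i' : Nat, Nat.find hex < i' → i' < Nat.find hexI →
        pvKeyN lista (Nat.find hex) i' ≠ pvGap lista := by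
      intro i' h1 h2 hcontra
      exact Nat.find_min hexI h2 ⟨h1, by omega, hcontra⟩
    rw [A_val lista hdom (pvGap lista) hle (Nat.find hex) (Nat.find hexI) hXI hIn hkey
        hXleast hIleast,
      B_val lista hn (Nat.find hex) (Nat.find hexI) hXI hIn hkey hXleast hIleast]
  · rw [parproximo_eq, pvPairs_eq_nil (PySem.List.len lista)
      (by simp only [PySem.List.len_eq]; omega)]
    unfold parproximo_alt
    simp only []
    rw [if_pos (by simp only [PySem.List.len_eq]; omega)]
    rfl
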